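-- pv_equiv track=rewrite | github.com/stolostron/canary-reporting | generators/GitHubIssueGenerator.py | filter_ordered_tags
-- ===== SOURCE A (Python) =====
-- def filter_ordered_tags(target, ordered_filter):
--     """Helper function to filer an input list to include only the filter_ordered_tagshighest-indexed entry given an ordered list of priority/severity tags."""
--     _highest=len(ordered_filter)
--     for t in target:
--         _highest = ordered_filter.index(t) if t in ordered_filter and ordered_filter.index(t) < _highest else _highest
--     if _highest < len(ordered_filter):
--         ordered_filter.remove(ordered_filter[_highest])
--         _filtered_target = [t for t in target if t not in ordered_filter]
--         return _filtered_target
--     else: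
--         return target
-- ===== SOURCE B (Python) =====
-- def filter_ordered_tags(target, ordered_filter):
--     """Keep only the highest-priority tag (first entry of ordered_filter present
--     in target) plus all non-filter tags; mutates ordered_filter like the original."""
--     tset = set(target)
--     best = next((t for t in ordered_filter if t in tset), None)
--     if best is None:
--         return target
--     ordered_filter.remove(best)
--     return [t for t in target if t not in ordered_filter]
-- ===== Notes on version B (the rewrite author's own statement) =====
-- stated objective: alternative
-- what changed: Instead of scanning target and tracking the minimum ordered_filter.index (repeated O(m) index/in scans per element), B builds a set from target once and walks ordered_filter in priority order, breaking at the first tag present in target.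
import Mathlib
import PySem

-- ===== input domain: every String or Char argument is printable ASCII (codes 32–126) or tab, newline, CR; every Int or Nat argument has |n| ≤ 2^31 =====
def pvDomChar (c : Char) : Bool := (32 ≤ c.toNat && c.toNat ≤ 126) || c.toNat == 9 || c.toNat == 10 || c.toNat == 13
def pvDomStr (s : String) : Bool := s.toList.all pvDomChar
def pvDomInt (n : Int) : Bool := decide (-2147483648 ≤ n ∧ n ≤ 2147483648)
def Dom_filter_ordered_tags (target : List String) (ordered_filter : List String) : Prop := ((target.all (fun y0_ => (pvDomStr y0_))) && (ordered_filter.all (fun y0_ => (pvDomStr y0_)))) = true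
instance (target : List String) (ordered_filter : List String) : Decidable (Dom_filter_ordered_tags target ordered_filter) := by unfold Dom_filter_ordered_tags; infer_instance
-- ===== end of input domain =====

-- B walks ordered_filter in priority order with a set built from target, instead of
-- scanning target and tracking a minimum index over ordered_filter (an alternative traversal).
-- Both A and B mutate the Python ordered_filter argument identically on the found
-- path; the equivalence proved here is about the return value.

-- ===== PORT A =====
-- A-side helper: the body of A's for-loop (the conditional expression updating _highest).
def pvStep (ordered_filter : List String) (acc : Nat) (t : String) : Nat :=
  match PySem.List.index? ordered_filter t with
  | some i => if i < acc then i else acc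
  | none => acc

def filter_ordered_tags (target : List String) (ordered_filter : List String) : List String :=
  let h : Nat := target.foldl (pvStep ordered_filter) ordered_filter.length
  if hlt : h < ordered_filter.length then
    match PySem.List.remove? ordered_filter ordered_filter[h] with
    | some rest => target.filter (fun t => !rest.contains t)
    | none => target  -- unreachable: ordered_filter[h] is a member
  else
    target

-- ===== PORT B =====
def filter_ordered_tags_alt (target : List String) (ordered_filter : List String) : List String :=
  let tset : PySem.Set String := PySem.Set.ofList target
  match ordered_filter.find? (fun t => PySem.Set.contains tset t) with
  | none => target
  | some best =>
    match PySem.List.remove? ordered_filter best with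
    | some rest => target.filter (fun t => !rest.contains t)
    | none => target  -- unreachable: best was found in ordered_filter

-- ===== PRECONDITION & SPEC =====
def Spec_filter_ordered_tags (target : List String) (ordered_filter : List String) (out : List String) : Prop := out = filter_ordered_tags_alt target ordered_filter
instance (target : List String) (ordered_filter : List String) (out : List String) : Decidable (Spec_filter_ordered_tags target ordered_filter out) := by unfold Spec_filter_ordered_tags; infer_instance

-- ===== CLAIM (what is proved, stated in full; the proofs are below) =====
def Claim_equal_filter_ordered_tags : Prop := ∀ (target : List String) (ordered_filter : List String), Dom_filter_ordered_tags target ordered_filter → Spec_filter_ordered_tags target ordered_filter (filter_ordered_tags target ordered_filter)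

-- ===== LEMMAS AND PROOFS =====

lemma pvStep_le (ordered_filter : List String) (acc : Nat) (t : String) :
    pvStep ordered_filter acc t ≤ acc := by
  unfold pvStep
  cases PySem.List.index? ordered_filter t with
  | none => exact le_refl _
  | some i => dsimp only; split <;> omega

lemma pvFold_le (ordered_filter : List String) (l : List String) (acc : Nat) :
    l.foldl (pvStep ordered_filter) acc ≤ acc := by
  induction l generalizing acc with
  | nil => exact le_refl _
  | cons x xs ih =>
    simp only [List.foldl_cons]
    exact le_trans (ih _) (pvStep_le _ _ _)

-- The fold result is a lower bound of the index of every target element found.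
lemma pvFold_lb (ordered_filter : List String) (l : List String) (acc : Nat)
    (t : String) (i : Nat) (ht : t ∈ l)
    (hi : PySem.List.index? ordered_filter t = some i) :
    l.foldl (pvStep ordered_filter) acc ≤ i := by
  induction l generalizing acc with
  | nil => cases ht
  | cons x xs ih =>
    simp only [List.foldl_cons]
    rcases List.mem_cons.mp ht with rfl | hmem
    · refine le_trans (pvFold_le _ _ _) ?_
      unfold pvStep; rw [hi]; dsimp only; split <;> omega
    · exact ih _ hmem

-- If the fold moved below its start, its result is the index of some element of l.
lemma pvFold_hit (ordered_filter : List String) (l : List String) (acc : Nat)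
    (h : l.foldl (pvStep ordered_filter) acc < acc) :
    ∃ t ∈ l, PySem.List.index? ordered_filter t =
      some (l.foldl (pvStep ordered_filter) acc) := by
  induction l generalizing acc with
  | nil => simp only [List.foldl_nil] at h; omega
  | cons x xs ih =>
    simp only [List.foldl_cons] at h ⊢
    by_cases hlt : xs.foldl (pvStep ordered_filter) (pvStep ordered_filter acc x) <
        pvStep ordered_filter acc x
    · obtain ⟨t, ht, hidx⟩ := ih _ hlt
      exact ⟨t, List.mem_cons_of_mem _ ht, hidx⟩
    · have heq : xs.foldl (pvStep ordered_filter) (pvStep ordered_filter acc x) =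
          pvStep ordered_filter acc x := le_antisymm (pvFold_le _ _ _) (le_of_not_gt hlt)
      rw [heq] at h ⊢
      refine ⟨x, List.mem_cons_self, ?_⟩
      unfold pvStep at h ⊢
      cases hix : PySem.List.index? ordered_filter x with
      | none => rw [hix] at h; dsimp only at h; omega
      | some i =>
        rw [hix] at h
        by_cases hc : i < acc
        · simp [hc]
        · simp [hc] at h

-- index? of an element seen at position j points at or before j.
lemma pvIndex_le {xs : List String} {j i : Nat} (hj : j < xs.length)
    (hidx : PySem.List.index? xs xs[j] = some i) : i ≤ j := by
  obtain ⟨hk, hget, hfirst⟩ := PySem.List.getElem_of_index?_eq_some hidx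
  by_contra hgt
  exact hfirst j (by omega) rfl

-- find? returns xs[k] when the predicate fails strictly before k and holds at k.
lemma pvFind_getElem {α : Type} (p : α → Bool) (xs : List α) (k : Nat)
    (hk : k < xs.length) (hp : p xs[k] = true)
    (hprev : ∀ j (hj : j < k), p (xs[j]'(by omega)) = false) :
    xs.find? p = some (xs[k]) := by
  induction xs generalizing k with
  | nil => simp at hk
  | cons x xs ih =>
    cases k with
    | zero => simp_all
    | succ k =>
      have hx : p x = false := hprev 0 (Nat.succ_pos _)
      simp only [List.find?_cons, hx]
      exact ih k (by simpa using hk) (by simpa using hp)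
        (fun j hj => by simpa using hprev (j + 1) (by omega))

-- ===== VERDICT (by name: the statement is the Claim_ definition above) =====
theorem filter_ordered_tags_spec : Claim_equal_filter_ordered_tags := by
  intro target ordered_filter _
  unfold Spec_filter_ordered_tags filter_ordered_tags filter_ordered_tags_alt
  dsimp only
  by_cases hlt : target.foldl (pvStep ordered_filter) ordered_filter.length <
      ordered_filter.length
  · -- found path: B's first match is exactly A's ordered_filter[h]
    obtain ⟨t, ht, hidx⟩ := pvFold_hit ordered_filter target ordered_filter.length hlt
    obtain ⟨hk, hget, hfirst⟩ := PySem.List.getElem_of_index?_eq_some hidx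
    have hfind : ordered_filter.find?
        (fun s => PySem.Set.contains (PySem.Set.ofList target) s) =
        some (ordered_filter[target.foldl (pvStep ordered_filter) ordered_filter.length]'hk) := by
      apply pvFind_getElem _ _ _ hk
      · have : (ordered_filter[target.foldl (pvStep ordered_filter)
            ordered_filter.length]'hk) ∈ target := hget ▸ ht
        simpa [PySem.Set.contains_iff, PySem.Set.mem_ofList]
      · intro j hj
        by_contra hp
        have hjlen : j < ordered_filter.length := by omega
        have hmem : ordered_filter[j] ∈ target := by
          have := eq_true_of_ne_false hp
          simpa [PySem.Set.contains_iff, PySem.Set.mem_ofList] using this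
        cases hi : PySem.List.index? ordered_filter ordered_filter[j] with
        | none =>
          rw [PySem.List.index?_eq_none_iff] at hi
          exact hi (List.getElem_mem hjlen)
        | some i =>
        have h1 : i ≤ j := pvIndex_le hjlen hi
        have h2 : target.foldl (pvStep ordered_filter) ordered_filter.length ≤ i :=
          pvFold_lb ordered_filter target ordered_filter.length _ i hmem hi
        omega
    rw [dif_pos hlt, hfind]
  · -- no filter tag present in target: both sides return target
    have hfind : ordered_filter.find?
        (fun s => PySem.Set.contains (PySem.Set.ofList target) s) = none := by
      rw [List.find?_eq_none]
      intro x hx hpx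
      have hmem : x ∈ target := by
        simpa [PySem.Set.contains_iff, PySem.Set.mem_ofList] using hpx
      cases hi : PySem.List.index? ordered_filter x with
      | none =>
        rw [PySem.List.index?_eq_none_iff] at hi
        exact hi hx
      | some i =>
      obtain ⟨hik, -, -⟩ := PySem.List.getElem_of_index?_eq_some hi
      have h2 : target.foldl (pvStep ordered_filter) ordered_filter.length ≤ i :=
        pvFold_lb ordered_filter target ordered_filter.length _ i hmem hi
      omega
    rw [dif_neg hlt, hfind]
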